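-- pv_equiv track=rewrite | github.com/manwar/perlweeklychallenge-club | challenge-302/lubos-kolouch/python/ch-2.py | minimum_start_value
-- ===== SOURCE A (Python) =====
-- from collections.abc import Sequence
--
-- def minimum_start_value(ints: Sequence[int]) -> int:
--     """Return minimum positive start value so running sum never drops below 1."""
--     prefix = 0
--     min_prefix = 0
--     for value in ints:
--         prefix += value
--         if prefix < min_prefix:
--             min_prefix = prefix
--     return 1 - min_prefix
-- ===== SOURCE B (Python) =====
-- def minimum_start_value(ints):
--     """Return minimum positive start value so running sum never drops below 1.
--
--     Backward dynamic programming: `need` is the least positive value one must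
--     hold *before* the remaining suffix so the running sum stays >= 1; walking
--     the list right-to-left, need = max(1, need - v).  No prefix sums, no min.
--     """
--     need = 1
--     for v in reversed(ints):
--         need = max(1, need - v)
--     return need
-- ===== Notes on version B (the rewrite author's own statement) =====
-- stated objective: alternative
-- what changed: Replaced the forward prefix-sum scan that tracks the minimum prefix by a backward dynamic-programming pass over the reversed list with the recurrence need = max(1, need - v), computing the required start value directly with no prefix sums and no minimum tracking.
import Mathlib
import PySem

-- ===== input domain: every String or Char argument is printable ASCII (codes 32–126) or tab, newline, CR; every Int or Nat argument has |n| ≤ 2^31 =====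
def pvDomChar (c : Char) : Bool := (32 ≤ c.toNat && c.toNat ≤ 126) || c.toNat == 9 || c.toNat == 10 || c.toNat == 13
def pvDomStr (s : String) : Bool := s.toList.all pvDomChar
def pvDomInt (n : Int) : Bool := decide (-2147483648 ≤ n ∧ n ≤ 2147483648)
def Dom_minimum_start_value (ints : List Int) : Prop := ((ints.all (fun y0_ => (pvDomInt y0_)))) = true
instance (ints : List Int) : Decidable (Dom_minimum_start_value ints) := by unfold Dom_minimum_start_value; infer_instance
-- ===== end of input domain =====

-- B replaces A's forward prefix-sum/min scan by a backward pass need = max(1, need - v); alternative algorithm, same cost.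

-- ===== PORT A =====
-- A: single forward loop carrying (prefix, min_prefix); returns 1 - min_prefix.
def minimum_start_value (ints : List Int) : Int :=
  let s := ints.foldl
    (fun (s : Int × Int) value =>
      let pfx := s.1 + value
      (pfx, if pfx < s.2 then pfx else s.2))
    (0, 0)
  1 - s.2

-- ===== PORT B =====
-- B: loop over reversed(ints) with need = max(1, need - v), starting from 1.
def minimum_start_value_alt (ints : List Int) : Int :=
  ints.reverse.foldl (fun need v => max 1 (need - v)) 1

-- ===== PRECONDITION & SPEC =====
def Spec_minimum_start_value (ints : List Int) (out : Int) : Prop := out = minimum_start_value_alt ints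
instance (ints : List Int) (out : Int) : Decidable (Spec_minimum_start_value ints out) := by unfold Spec_minimum_start_value; infer_instance

-- ===== CLAIM (what is proved, stated in full; the proofs are below) =====
def Claim_equal_minimum_start_value : Prop := ∀ (ints : List Int), Dom_minimum_start_value ints → Spec_minimum_start_value ints (minimum_start_value ints)

-- ===== LEMMAS AND PROOFS =====

-- B's backward fold, written as a foldr for structural induction.
def pvNeed (xs : List Int) : Int := xs.foldr (fun v need => max 1 (need - v)) 1

theorem pvNeed_ge_one (xs : List Int) : 1 ≤ pvNeed xs := by
  induction xs with
  | nil => simp [pvNeed]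
  | cons x xs ih => simp only [pvNeed, List.foldr] at *; omega

-- A's min-accumulator, from any state (p, m) with m ≤ 0 and m ≤ p, ends at min m (p + 1 - pvNeed xs).
theorem pv_loop (xs : List Int) : ∀ (p m : Int), m ≤ 0 → m ≤ p →
    (xs.foldl
      (fun (s : Int × Int) value =>
        let pfx := s.1 + value
        (pfx, if pfx < s.2 then pfx else s.2))
      (p, m)).2 = min m (p + 1 - pvNeed xs) := by
  induction xs with
  | nil => intro p m h0 hp; simp [pvNeed]; omega
  | cons x xs ih =>
    intro p m h0 hp
    simp only [List.foldl]
    have hge := pvNeed_ge_one xs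
    have h1 : (if p + x < m then p + x else m) = min m (p + x) := by omega
    rw [h1, ih (p + x) (min m (p + x)) (by omega) (by omega)]
    simp only [pvNeed, List.foldr] at *
    omega

-- ===== VERDICT (by name: the statement is the Claim_ definition above) =====
theorem minimum_start_value_spec : Claim_equal_minimum_start_value := by
  intro ints _
  unfold Spec_minimum_start_value minimum_start_value minimum_start_value_alt
  rw [List.foldl_reverse]
  have h := pv_loop ints 0 0 le_rfl le_rfl
  have hge := pvNeed_ge_one ints
  simp only [pvNeed] at h hge
  show 1 - (List.foldl
      (fun (s : Int × Int) value =>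
        let pfx := s.1 + value
        (pfx, if pfx < s.2 then pfx else s.2))
      (0, 0) ints).2 = _
  rw [h]
  omega
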